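-- pv_equiv track=rewrite | github.com/RushabhShahPrograms/30DaysOfCode | Day 23/Many, Still One.py | solve
-- ===== SOURCE A (Python) =====
-- def solve(nums):
--     alreadyseen = 0
--     """
--     0 means never seen
--     1 means currently seeing
--     2 means has finished seeing
--     """
--     for x in nums:
--         if x == 1:
--             if alreadyseen == 2:
--                 return False
--             alreadyseen = 1
--         elif alreadyseen:
--             alreadyseen = 2
--     return True
-- ===== SOURCE B (Python) =====
-- def solve(nums):
--     idxs = [i for i, x in enumerate(nums) if x == 1]
--     if not idxs:
--         return True
--     return idxs[-1] - idxs[0] + 1 == len(idxs)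
-- ===== Notes on version B (the rewrite author's own statement) =====
-- stated objective: simpler
-- what changed: Replaced the three-state running state machine with an extract-then-arithmetic check: collect the indices of the 1s and test that the span from first to last equals their count.
import Mathlib
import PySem

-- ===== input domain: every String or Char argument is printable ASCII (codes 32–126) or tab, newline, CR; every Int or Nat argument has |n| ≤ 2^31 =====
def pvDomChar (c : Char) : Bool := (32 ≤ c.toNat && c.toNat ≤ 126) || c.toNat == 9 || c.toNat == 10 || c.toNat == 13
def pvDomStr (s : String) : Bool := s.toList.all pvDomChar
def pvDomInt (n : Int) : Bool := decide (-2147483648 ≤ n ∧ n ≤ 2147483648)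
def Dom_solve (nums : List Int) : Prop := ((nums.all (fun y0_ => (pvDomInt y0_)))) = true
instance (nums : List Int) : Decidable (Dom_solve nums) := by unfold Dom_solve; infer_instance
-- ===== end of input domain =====

-- B replaces A's three-state scanning machine by collecting the indices of the 1s
-- and checking span-equals-count; same O(n) cost, simpler decomposition.


-- ===== PORT A =====
-- state machine: 0 = never seen a 1, 1 = currently seeing 1s, 2 = finished seeing
def solveGo : List Int → Int → Bool
  | [], _ => true
  | x :: xs, s =>
    if x = 1 then
      if s = 2 then false else solveGo xs 1
    else if s ≠ 0 then solveGo xs 2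
    else solveGo xs s

def solve (nums : List Int) : Bool := solveGo nums 0

-- ===== PORT B =====
def solve_alt (nums : List Int) : Bool :=
  let idxs := ((PySem.List.enumerate nums 0).filter (fun p => p.2 == 1)).map (fun p => p.1)
  match idxs with
  | [] => true
  | i :: rest => decide (rest.getLastD i - i + 1 = ((i :: rest).length : Int))

-- ===== PRECONDITION & SPEC =====
def Spec_solve (nums : List Int) (out : Bool) : Prop := out = solve_alt nums
instance (nums : List Int) (out : Bool) : Decidable (Spec_solve nums out) := by unfold Spec_solve; infer_instance

-- ===== CLAIM (what is proved, stated in full; the proofs are below) =====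
def Claim_equal_solve : Prop := ∀ (nums : List Int), Dom_solve nums → Spec_solve nums (solve nums)

-- ===== LEMMAS AND PROOFS =====

-- indices (starting at s) of the elements equal to 1
def onesAux (xs : List Int) (s : Int) : List Int :=
  ((PySem.List.enumerate xs s).filter (fun p => p.2 == 1)).map (fun p => p.1)

-- B's final check as a function of the index list
def spanChk : List Int → Bool
  | [] => true
  | i :: rest => decide (rest.getLastD i - i + 1 = ((i :: rest).length : Int))

def rangeFrom (m : Int) (n : Nat) : List Int := (List.range n).map (fun k : Nat => m + (k : Int))

lemma solveGo_cons (x : Int) (xs : List Int) (s : Int) :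
    solveGo (x :: xs) s
      = if x = 1 then (if s = 2 then false else solveGo xs 1)
        else if s ≠ 0 then solveGo xs 2 else solveGo xs s := rfl

lemma onesAux_nil (s : Int) : onesAux [] s = [] := by
  simp [onesAux, PySem.List.enumerate_nil]

lemma onesAux_cons (x : Int) (xs : List Int) (s : Int) :
    onesAux (x :: xs) s = if x = 1 then s :: onesAux xs (s + 1) else onesAux xs (s + 1) := by
  by_cases h : x = 1 <;> simp [onesAux, PySem.List.enumerate_cons, h]

lemma onesAux_ge (xs : List Int) (s : Int) : ∀ y ∈ onesAux xs s, s ≤ y := by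
  induction xs generalizing s with
  | nil => simp [onesAux_nil]
  | cons x xs ih =>
    intro y hy
    rw [onesAux_cons] at hy
    by_cases h : x = 1 <;> simp [h] at hy
    · rcases hy with rfl | hy
      · exact le_refl _
      · have := ih (s + 1) y hy; omega
    · have := ih (s + 1) y hy; omega

lemma onesAux_pairwise (xs : List Int) (s : Int) : (onesAux xs s).Pairwise (· < ·) := by
  induction xs generalizing s with
  | nil => simp [onesAux_nil]
  | cons x xs ih =>
    rw [onesAux_cons]
    by_cases h : x = 1 <;> simp [h]
    · exact ⟨fun y hy => by have := onesAux_ge xs (s + 1) y hy; omega, ih (s + 1)⟩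
    · exact ih (s + 1)

lemma rangeFrom_succ (m : Int) (n : Nat) : rangeFrom m (n + 1) = m :: rangeFrom (m + 1) n := by
  rw [rangeFrom, List.range_succ_eq_map, List.map_cons, List.map_map]
  refine List.cons_eq_cons.mpr ⟨by simp, ?_⟩
  apply List.map_congr_left
  intro k _
  simp only [Function.comp_apply, Nat.succ_eq_add_one]
  push_cast; ring

lemma rangeFrom_getLastD (m : Int) (n : Nat) (d : Int) :
    (rangeFrom m (n + 1)).getLastD d = m + n := by
  induction n generalizing m d with
  | zero => simp [rangeFrom]
  | succ n ih =>
    rw [rangeFrom_succ, List.getLastD_cons, ih]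
    push_cast; ring

-- bound: a strictly increasing nonempty list of ints all ≥ m has last element ≥ m + len - 1
lemma lastD_ge (t : List Int) (m d : Int) (hp : t.Pairwise (· < ·)) (hm : ∀ y ∈ t, m ≤ y)
    (hne : t ≠ []) : m + t.length - 1 ≤ t.getLastD d := by
  induction t generalizing m d with
  | nil => exact absurd rfl hne
  | cons a u ih =>
    have hpu := List.Pairwise.of_cons hp
    cases u with
    | nil => simpa using hm a (by simp)
    | cons b v =>
      have ha : m ≤ a := hm a (by simp)
      have hau : ∀ y ∈ b :: v, a + 1 ≤ y := by
        intro y hy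
        have := (List.pairwise_cons.mp hp).1 y hy; omega
      have h2 := ih (a + 1) a hpu hau (by simp)
      rw [List.getLastD_cons]
      simp only [List.length_cons] at h2 ⊢
      omega

-- key: last = m + len - 1 characterizes the consecutive integer range
lemma lastD_eq_iff (t : List Int) (m d : Int) (hp : t.Pairwise (· < ·)) (hm : ∀ y ∈ t, m ≤ y)
    (hne : t ≠ []) : (t.getLastD d = m + t.length - 1 ↔ t = rangeFrom m t.length) := by
  induction t generalizing m d with
  | nil => exact absurd rfl hne
  | cons a u ih =>
    have hpu := List.Pairwise.of_cons hp
    have ha : m ≤ a := hm a (by simp)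
    cases u with
    | nil =>
      constructor
      · intro h
        simp only [List.getLastD_cons, List.getLastD_nil, List.length_cons,
          List.length_nil] at h
        have hq : a = m := by omega
        subst hq
        simp [rangeFrom]
      · intro h
        simp [rangeFrom] at h
        subst h
        simp
      | cons b v =>
      have hau : ∀ y ∈ b :: v, a + 1 ≤ y := by
        intro y hy
        have := (List.pairwise_cons.mp hp).1 y hy; omega
      have hbound := lastD_ge (b :: v) (a + 1) a hpu hau (by simp)
      have hrec := ih (a + 1) a hpu hau (by simp)
      constructor
      · intro h
        rw [List.getLastD_cons] at h
        simp only [List.length_cons] at h hbound hrec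
        have ham : a = m := by omega
        subst ham
        have hlast : (b :: v).getLastD a = a + 1 + (↑v.length + 1) - 1 := by omega
        have hu := hrec.mp hlast
        rw [show ((a :: b :: v).length) = (b :: v).length + 1 from rfl, rangeFrom_succ]
        exact List.cons_eq_cons.mpr ⟨rfl, by simpa using hu⟩
      · intro h
        conv_lhs => rw [h]
        rw [show ((a :: b :: v).length) = (b :: v).length + 1 from rfl, rangeFrom_getLastD]
        simp only [List.length_cons]
        push_cast; ring

-- state 2: succeeds iff no further 1 occurs
lemma solveGo_two (xs : List Int) (s : Int) :
    solveGo xs 2 = decide (onesAux xs s = []) := by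
  induction xs generalizing s with
  | nil => simp [solveGo, onesAux_nil]
  | cons x xs ih =>
    rw [onesAux_cons, solveGo_cons]
    by_cases h : x = 1
    · rw [if_pos h, if_pos h, if_pos rfl]
      simp
    · rw [if_neg h, if_neg h, if_pos (by decide : (2:Int) ≠ 0), ih (s + 1)]

-- state 1: succeeds iff the remaining 1s sit at the very front (indices form a range from s)
lemma solveGo_one (xs : List Int) (s : Int) :
    solveGo xs 1 = decide (onesAux xs s = rangeFrom s (onesAux xs s).length) := by
  induction xs generalizing s with
  | nil => simp [solveGo, onesAux_nil, rangeFrom]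
  | cons x xs ih =>
    rw [onesAux_cons, solveGo_cons]
    by_cases h : x = 1
    · rw [if_pos h, if_pos h, if_neg (by decide : ¬ (1:Int) = 2), ih (s + 1)]
      rw [List.length_cons, rangeFrom_succ]
      simp
    · rw [if_neg h, if_neg h, if_pos (by decide : (1:Int) ≠ 0), solveGo_two xs (s + 1)]
      cases ht : onesAux xs (s + 1) with
      | nil => simp [rangeFrom]
      | cons a u =>
        have ha : s + 1 ≤ a := onesAux_ge xs (s + 1) a (by rw [ht]; simp)
        rw [List.length_cons, rangeFrom_succ]
        simp only [decide_eq_decide]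
        constructor
        · intro hc; cases hc
        · intro hc
          have := (List.cons_eq_cons.mp hc).1
          omega

-- state 0: the machine equals B's span check on the index list
lemma solveGo_zero (xs : List Int) (s : Int) :
    solveGo xs 0 = spanChk (onesAux xs s) := by
  induction xs generalizing s with
  | nil => simp [solveGo, onesAux_nil, spanChk]
  | cons x xs ih =>
    rw [onesAux_cons, solveGo_cons]
    by_cases h : x = 1
    · rw [if_pos h, if_pos h, if_neg (by decide : ¬ (0:Int) = 2), solveGo_one xs (s + 1)]
      cases ht : onesAux xs (s + 1) with
      | nil => simp [spanChk, rangeFrom]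
      | cons a u =>
        have hp : (a :: u).Pairwise (· < ·) := by rw [← ht]; exact onesAux_pairwise xs (s + 1)
        have hm : ∀ y ∈ a :: u, s + 1 ≤ y := by rw [← ht]; exact onesAux_ge xs (s + 1)
        have hiff := lastD_eq_iff (a :: u) (s + 1) s hp hm (by simp)
        simp only [spanChk, List.getLastD_cons, decide_eq_decide]
        rw [← hiff]
        simp only [List.getLastD_cons, List.length_cons] at hiff ⊢
        constructor
        · intro hE; push_cast at hE ⊢; omega
        · intro hE; push_cast at hE ⊢; omega
    · rw [if_neg h, if_neg h, if_neg (by simp : ¬ (0:Int) ≠ 0)]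
      exact ih (s + 1)

lemma solve_alt_eq (nums : List Int) : solve_alt nums = spanChk (onesAux nums 0) := by
  simp only [solve_alt, onesAux, spanChk]

-- ===== VERDICT (by name: the statement is the Claim_ definition above) =====
theorem solve_spec : Claim_equal_solve := by
  intro nums _
  unfold Spec_solve solve
  rw [solve_alt_eq, solveGo_zero nums 0]
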